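-- pv_equiv track=rewrite | github.com/AliGremLahkoNaWC/Programiranje1 | vaje14/teza_tovora.py | najlazji_predmet
-- ===== SOURCE A (Python) =====
-- def najlazji_predmet(tovor):
--     ''' funkcija vrne najlažje predmete, alfabetno urejene'''
--     urejen_tovor = {}
--     naj_m = 1029830183019283018203812038210983
--     for key, val in tovor.items():
--         if int(val) < naj_m:
--             naj_m = int(val)
--     for key, val in tovor.items():
--         if int(val) != naj_m:
--             pass
--         else:
--             urejen_tovor[key] = val
--     urejen_tovor = sorted(list(urejen_tovor))
--     return urejen_tovor
-- ===== SOURCE B (Python) =====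
-- def najlazji_predmet(tovor):
--     ''' funkcija vrne najlažje predmete, alfabetno urejene'''
--     groups = {}
--     for key, val in tovor.items():
--         groups.setdefault(int(val), []).append(key)
--     if not groups:
--         return []
--     return sorted(groups[min(groups)])
-- ===== Notes on version B (the rewrite author's own statement) =====
-- stated objective: simpler
-- what changed: Instead of scanning twice (sentinel-initialised minimum scan, then a re-filtering scan building a dict), B groups keys by weight in one pass and returns the sorted minimum bucket.
import Mathlib
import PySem

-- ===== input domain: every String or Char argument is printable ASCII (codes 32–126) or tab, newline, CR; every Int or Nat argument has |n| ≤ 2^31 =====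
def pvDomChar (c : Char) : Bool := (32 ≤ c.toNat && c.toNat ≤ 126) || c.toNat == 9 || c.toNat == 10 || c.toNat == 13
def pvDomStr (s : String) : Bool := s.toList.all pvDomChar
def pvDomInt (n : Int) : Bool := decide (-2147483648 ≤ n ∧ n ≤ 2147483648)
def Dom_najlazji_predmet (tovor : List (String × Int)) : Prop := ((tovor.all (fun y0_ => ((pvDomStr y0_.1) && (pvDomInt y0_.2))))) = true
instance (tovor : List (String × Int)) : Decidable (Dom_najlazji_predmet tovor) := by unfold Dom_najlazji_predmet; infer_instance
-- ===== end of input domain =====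

-- B replaces A's two scans (sentinel-initialised minimum scan + re-filter into a dict) by one
-- grouping pass over the items and a sorted minimum bucket; objective: simpler.


-- ===== PORT A =====
def najlazji_predmet (tovor : List (String × Int)) : List String :=
  let naj_m : Int :=
    tovor.foldl (fun m p => if p.2 < m then p.2 else m) 1029830183019283018203812038210983
  let urejen_tovor : PySem.Dict String Int :=
    tovor.foldl (fun d p => if p.2 ≠ naj_m then d else d.insert p.1 p.2) PySem.Dict.empty
  PySem.List.sorted urejen_tovor.keys (fun x => x) false

-- ===== PORT B =====
def najlazji_predmet_alt (tovor : List (String × Int)) : List String :=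
  let groups : PySem.Dict Int (List String) :=
    tovor.foldl (fun g p => g.modify p.2 [] (fun l => l ++ [p.1])) PySem.Dict.empty
  if groups.items.isEmpty then []
  else
    match PySem.List.min? groups.keys (fun x => x) with
    | some w => PySem.List.sorted (groups.getD w []) (fun x => x) false
    | none => []

-- ===== PRECONDITION & SPEC =====
-- Pre_ excludes association lists with duplicate keys: A's argument is a Python dict, whose keys
-- are necessarily distinct, so at the Python level this excludes no input A is ever called on.
def Pre_najlazji_predmet (tovor : List (String × Int)) : Prop := (tovor.map Prod.fst).Nodup
instance (tovor : List (String × Int)) : Decidable (Pre_najlazji_predmet tovor) := by unfold Pre_najlazji_predmet; infer_instance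

def pvWitness_najlazji_predmet : (List (String × Int)) := [("b", 2), ("a", 1), ("c", 1)]

def Spec_najlazji_predmet (tovor : List (String × Int)) (out : List String) : Prop := out = najlazji_predmet_alt tovor
instance (tovor : List (String × Int)) (out : List String) : Decidable (Spec_najlazji_predmet tovor out) := by unfold Spec_najlazji_predmet; infer_instance

-- ===== CLAIM (what is proved, stated in full; the proofs are below) =====
def Claim_equal_najlazji_predmet : Prop := ∀ (tovor : List (String × Int)), Dom_najlazji_predmet tovor → Pre_najlazji_predmet tovor → Spec_najlazji_predmet tovor (najlazji_predmet tovor)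

-- ===== LEMMAS AND PROOFS =====

-- A's running-minimum step is `min`.
theorem foldA_eq_foldl_min (l : List Int) (a : Int) :
    l.foldl (fun m v => if v < m then v else m) a = l.foldl min a := by
  induction l generalizing a with
  | nil => rfl
  | cons x t ih =>
      simp only [List.foldl_cons, ih]
      congr 1
      by_cases h : x < a <;> simp [min_def] <;> omega

theorem foldl_min_mem {l : List Int} {a : Int} :
    l.foldl min a = a ∨ l.foldl min a ∈ l := by
  induction l generalizing a with
  | nil => simp
  | cons x t ih =>
      simp only [List.foldl_cons, List.mem_cons]
      rcases @ih (min a x) with h | h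
      · rw [h]
        rcases min_cases a x with ⟨h', _⟩ | ⟨h', _⟩ <;> simp [h']
      · simp [h]

theorem foldl_min_le {l : List Int} {a : Int} :
    l.foldl min a ≤ a ∧ ∀ y ∈ l, l.foldl min a ≤ y := by
  induction l generalizing a with
  | nil => simp
  | cons x t ih =>
      simp only [List.foldl_cons, List.mem_cons]
      refine ⟨le_trans (@ih (min a x)).1 (min_le_left _ _), ?_⟩
      rintro y (rfl | hy)
      · exact le_trans (@ih (min a y)).1 (min_le_right _ _)
      · exact (@ih (min a x)).2 y hy

-- A's conditional-insert loop is the insert loop over the filtered list.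
theorem foldA_filter (tovor : List (String × Int)) (m : Int) (d : PySem.Dict String Int) :
    tovor.foldl (fun d p => if p.2 ≠ m then d else d.insert p.1 p.2) d
      = (tovor.filter (fun p => p.2 == m)).foldl (fun d p => d.insert p.1 p.2) d := by
  induction tovor generalizing d with
  | nil => rfl
  | cons x t ih =>
      rw [List.foldl_cons, List.filter_cons]
      by_cases h : x.2 = m
      · rw [if_pos (show (x.2 == m) = true by simp [h]), List.foldl_cons,
          show (if x.2 ≠ m then d else d.insert x.1 x.2) = d.insert x.1 x.2 from
            if_neg (show ¬ x.2 ≠ m by simp [h])]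
        exact ih _
      · rw [if_neg (show ¬ (x.2 == m) = true by simp [h]),
          show (if x.2 ≠ m then d else d.insert x.1 x.2) = d from if_pos h]
        exact ih _

theorem swap_filter_map (tovor : List (String × Int)) (w : Int) :
    ((tovor.map Prod.swap).filter (fun p => p.1 == w)).map (fun p => p.2)
      = (tovor.filter (fun p => p.2 == w)).map Prod.fst := by
  induction tovor with
  | nil => rfl
  | cons x t ih =>
      by_cases h : x.2 = w <;> simp [h, Prod.swap, ih]

theorem najlazji_predmet_spec_aux (tovor : List (String × Int))
    (hdom : Dom_najlazji_predmet tovor) (hpre : Pre_najlazji_predmet tovor) :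
    najlazji_predmet tovor = najlazji_predmet_alt tovor := by
  cases tovor with
  | nil => rfl
  | cons hd tl =>
    set tovor := hd :: tl with htov
    -- bound from the domain: every weight is below A's sentinel
    have hbound : ∀ p ∈ tovor, p.2 < (1029830183019283018203812038210983 : Int) := by
      intro p hp
      have := (List.all_eq_true.mp hdom) p hp
      simp only [pvDomInt, Bool.and_eq_true, decide_eq_true_eq] at this
      omega
    -- A's minimum
    set S : Int := 1029830183019283018203812038210983 with hS
    set m : Int := tovor.foldl (fun m p => if p.2 < m then p.2 else m) S with hm
    have hm' : m = (tovor.map Prod.snd).foldl min S := by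
      rw [hm, ← foldA_eq_foldl_min, List.foldl_map]
    have hm_le : ∀ y ∈ tovor.map Prod.snd, m ≤ y := by
      rw [hm']; exact foldl_min_le.2
    have hm_mem : m ∈ tovor.map Prod.snd := by
      rcases (hm' ▸ foldl_min_mem) with h | h
      · exfalso
        have h1 : m ≤ hd.2 := hm_le hd.2 (by simp [htov])
        have h2 : hd.2 < S := hbound hd (by simp [htov])
        omega
      · exact h
    -- B's groups
    set groups : PySem.Dict Int (List String) :=
      tovor.foldl (fun g p => g.modify p.2 [] (fun l => l ++ [p.1])) PySem.Dict.empty with hg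
    have hgswap : groups = (tovor.map Prod.swap).foldl
        (fun d p => d.modify p.1 [] (fun x => x ++ [p.2])) PySem.Dict.empty := by
      rw [hg, List.foldl_map]
      rfl
    have hkeys : groups.keys = PySem.Set.ofList (tovor.map Prod.snd) := by
      have h1 : ((tovor.map Prod.swap).foldl
          (fun d p => d.modify p.1 [] (fun x => x ++ [p.2])) PySem.Dict.empty).keys
          = PySem.Set.update (PySem.Dict.empty : PySem.Dict Int (List String)).keys
              ((tovor.map Prod.swap).map Prod.fst) :=
        PySem.Dict.keys_foldl_modify_key (tovor.map Prod.swap) Prod.fst []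
          (fun _ p => (fun x => x ++ [p.2])) PySem.Dict.empty
      have h2 : (tovor.map Prod.swap).map Prod.fst = tovor.map Prod.snd := by
        simp [Function.comp, Prod.swap]
      rw [hgswap, h1, h2, PySem.Dict.keys_empty]
      exact PySem.Set.update_empty _
    have hkeys_ne : groups.keys ≠ [] := by
      rw [hkeys]
      intro h
      have : hd.2 ∈ PySem.Set.ofList (tovor.map Prod.snd) :=
        (PySem.Set.mem_ofList _ _).2 (by simp [htov])
      simp [h] at this
    have hitems_ne : groups.items.isEmpty = false := by
      cases hi : groups.items with
      | nil => exact absurd (by simp [PySem.Dict.keys, hi]) hkeys_ne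
      | cons a l => rfl
    -- B's minimum key is m
    obtain ⟨w, hw⟩ : ∃ w, PySem.List.min? groups.keys (fun x => x) = some w := by
      cases hmin : PySem.List.min? groups.keys (fun x => x) with
      | none => exact absurd ((PySem.List.min?_eq_none_iff _ _).1 hmin) hkeys_ne
      | some w => exact ⟨w, rfl⟩
    have hw_mem : w ∈ tovor.map Prod.snd := by
      have := PySem.List.min?_mem hw
      rw [hkeys] at this
      exact (PySem.Set.mem_ofList _ _).1 this
    have hw_le : ∀ y ∈ tovor.map Prod.snd, w ≤ y := by
      intro y hy
      exact PySem.List.min?_isMin hw y (by rw [hkeys]; exact (PySem.Set.mem_ofList _ _).2 hy)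
    have hwm : w = m := le_antisymm (hw_le m hm_mem) (hm_le w hw_mem)
    -- the two result lists coincide
    have hbucket : groups.getD w [] = (tovor.filter (fun p => p.2 == m)).map Prod.fst := by
      have h1 : ((tovor.map Prod.swap).foldl
          (fun d p => d.modify p.1 [] (fun x => x ++ [p.2])) PySem.Dict.empty).getD w []
          = (PySem.Dict.empty : PySem.Dict Int (List String)).getD w []
              ++ ((tovor.map Prod.swap).filter (fun p => p.1 == w)).map (fun p => p.2) :=
        PySem.Dict.getD_foldl_modify_append (tovor.map Prod.swap) PySem.Dict.empty w
      rw [hgswap, h1, PySem.Dict.getD_empty, List.nil_append, swap_filter_map, hwm]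
    have hAkeys : (tovor.foldl (fun d p => if p.2 ≠ m then d else d.insert p.1 p.2)
        PySem.Dict.empty).keys = (tovor.filter (fun p => p.2 == m)).map Prod.fst := by
      rw [foldA_filter]
      have hnd : ((tovor.filter (fun p => p.2 == m)).map Prod.fst).Nodup :=
        ((List.filter_sublist).map Prod.fst).nodup hpre
      have := PySem.Dict.items_foldl_insert_fresh (tovor.filter (fun p => p.2 == m))
        Prod.fst Prod.snd PySem.Dict.empty (by intro a _; rfl) hnd
      simp only [PySem.Dict.keys, this]
      simp [PySem.Dict.empty]
    -- assemble
    show (let naj_m := tovor.foldl (fun m p => if p.2 < m then p.2 else m) S;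
      let urejen_tovor := tovor.foldl (fun d p => if p.2 ≠ naj_m then d else d.insert p.1 p.2)
        PySem.Dict.empty;
      PySem.List.sorted urejen_tovor.keys (fun x => x) false) = _
    rw [najlazji_predmet_alt]
    simp only [← hm, ← hg, hitems_ne, Bool.false_eq_true, if_false, hw]
    rw [hAkeys, hbucket]

-- ===== VERDICT (by name: the statement is the Claim_ definition above) =====
theorem najlazji_predmet_spec : Claim_equal_najlazji_predmet := by
  intro tovor hdom hpre
  exact najlazji_predmet_spec_aux tovor hdom hpre
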